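-- pv_equiv track=rewrite | github.com/slittycode/enhance-video | upscale_video.py | build_scene_ranges
-- ===== SOURCE A (Python) =====
-- def build_scene_ranges(
--     total_frames: int,
--     boundaries: list[int],
--     min_scene_frames: int,
-- ) -> list[tuple[int, int]]:
--     """Build scene ranges from boundary end-frame indices."""
--     if total_frames <= 0:
--         return []
--
--     valid_boundaries = sorted(
--         {
--             boundary
--             for boundary in boundaries
--             if 1 <= boundary < total_frames
--         }
--     )
--     ranges: list[tuple[int, int]] = []
--     start = 1
--     for boundary in valid_boundaries:
--         if boundary >= start:
--             ranges.append((start, boundary))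
--             start = boundary + 1
--     ranges.append((start, total_frames))
--
--     if min_scene_frames <= 1:
--         return ranges
--
--     merged: list[tuple[int, int]] = []
--     for current in ranges:
--         current_len = current[1] - current[0] + 1
--         if not merged:
--             merged.append(current)
--             continue
--
--         if current_len < min_scene_frames:
--             previous = merged[-1]
--             merged[-1] = (previous[0], current[1])
--         else:
--             merged.append(current)
--
--     return merged
-- ===== SOURCE B (Python) =====
-- def build_scene_ranges(
--     total_frames: int,
--     boundaries: list[int],
--     min_scene_frames: int,
-- ) -> list[tuple[int, int]]:
--     """Filter boundaries by the look-ahead gap, then build ranges in one pass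
--     (no separate merge-by-extension pass)."""
--     if total_frames <= 0:
--         return []
--
--     valid = sorted({b for b in boundaries if 1 <= b < total_frames})
--
--     if min_scene_frames <= 1:
--         kept = valid
--     else:
--         nexts = valid[1:] + [total_frames]
--         kept = [b for b, nxt in zip(valid, nexts) if nxt - b >= min_scene_frames]
--
--     ranges: list[tuple[int, int]] = []
--     start = 1
--     for b in kept:
--         ranges.append((start, b))
--         start = b + 1
--     ranges.append((start, total_frames))
--     return ranges
-- ===== Notes on version B (the rewrite author's own statement) =====
-- stated objective: simpler
-- what changed: Replaces A's two-pass build-then-merge-by-extension with a single look-ahead filter of the sorted boundaries (keep a cut iff the gap to the next boundary or to total_frames is >= min_scene_frames) followed by one unconditional range-construction pass.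
import Mathlib
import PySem

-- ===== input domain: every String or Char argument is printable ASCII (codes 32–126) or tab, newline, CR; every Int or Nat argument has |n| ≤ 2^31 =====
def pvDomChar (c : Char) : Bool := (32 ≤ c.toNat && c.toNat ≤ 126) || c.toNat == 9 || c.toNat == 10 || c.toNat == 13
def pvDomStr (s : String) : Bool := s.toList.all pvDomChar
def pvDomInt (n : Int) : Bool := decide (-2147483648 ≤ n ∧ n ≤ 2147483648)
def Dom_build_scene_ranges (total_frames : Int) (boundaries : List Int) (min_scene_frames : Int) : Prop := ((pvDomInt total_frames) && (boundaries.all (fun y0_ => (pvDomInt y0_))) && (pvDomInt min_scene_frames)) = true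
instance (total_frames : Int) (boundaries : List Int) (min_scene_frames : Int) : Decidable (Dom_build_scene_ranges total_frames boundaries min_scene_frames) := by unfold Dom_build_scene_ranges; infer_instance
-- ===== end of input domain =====

-- B replaces A's second merge-by-extension pass by filtering each boundary on its
-- look-ahead gap and building the ranges in one unconditional pass (objective: simpler).

-- ===== PORT A =====
-- step of A's first loop (build ranges from boundaries)
def pvCutStepA (st : List (Int × Int) × Int) (boundary : Int) : List (Int × Int) × Int :=
  if st.2 ≤ boundary then (st.1 ++ [(st.2, boundary)], boundary + 1) else st

-- step of A's merge loop; 'merged[-1] = (previous[0], current[1])' is dropLast ++ [..]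
def pvMergeStepA (min_scene_frames : Int) (merged : List (Int × Int)) (current : Int × Int) : List (Int × Int) :=
  let current_len := current.2 - current.1 + 1
  if merged = [] then merged ++ [current]
  else if current_len < min_scene_frames then
    merged.dropLast ++ [((merged.getLast?.getD (0, 0)).1, current.2)]
  else merged ++ [current]

def build_scene_ranges (total_frames : Int) (boundaries : List Int) (min_scene_frames : Int) : List (Int × Int) :=
  if total_frames ≤ 0 then []
  else
    let valid_boundaries := PySem.List.sorted
      (PySem.Set.ofList (boundaries.filter (fun b => decide (1 ≤ b) && decide (b < total_frames))))
      (fun x => x) false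
    let st := valid_boundaries.foldl pvCutStepA ([], 1)
    let ranges := st.1 ++ [(st.2, total_frames)]
    if min_scene_frames ≤ 1 then ranges
    else ranges.foldl (pvMergeStepA min_scene_frames) []

-- ===== PORT B =====
-- step of B's single construction loop (appends unconditionally)
def pvCutStepB (st : List (Int × Int) × Int) (b : Int) : List (Int × Int) × Int :=
  (st.1 ++ [(st.2, b)], b + 1)

def build_scene_ranges_alt (total_frames : Int) (boundaries : List Int) (min_scene_frames : Int) : List (Int × Int) :=
  if total_frames ≤ 0 then []
  else
    let valid := PySem.List.sorted
      (PySem.Set.ofList (boundaries.filter (fun b => decide (1 ≤ b) && decide (b < total_frames))))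
      (fun x => x) false
    let kept :=
      if min_scene_frames ≤ 1 then valid
      else
        let nexts := PySem.List.slice valid (some 1) none ++ [total_frames]
        ((valid.zip nexts).filter (fun p => decide (min_scene_frames ≤ p.2 - p.1))).map Prod.fst
    let st := kept.foldl pvCutStepB ([], 1)
    st.1 ++ [(st.2, total_frames)]

-- ===== PRECONDITION & SPEC =====
def Spec_build_scene_ranges (total_frames : Int) (boundaries : List Int) (min_scene_frames : Int) (out : List (Int × Int)) : Prop := out = build_scene_ranges_alt total_frames boundaries min_scene_frames
instance (total_frames : Int) (boundaries : List Int) (min_scene_frames : Int) (out : List (Int × Int)) : Decidable (Spec_build_scene_ranges total_frames boundaries min_scene_frames out) := by unfold Spec_build_scene_ranges; infer_instance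

-- ===== CLAIM (what is proved, stated in full; the proofs are below) =====
def Claim_equal_build_scene_ranges : Prop := ∀ (total_frames : Int) (boundaries : List Int) (min_scene_frames : Int), Dom_build_scene_ranges total_frames boundaries min_scene_frames → Spec_build_scene_ranges total_frames boundaries min_scene_frames (build_scene_ranges total_frames boundaries min_scene_frames)

-- ===== LEMMAS AND PROOFS =====

-- the ranges over a cut list vs from start s, ending at total
def pvChain (total : Int) : Int → List Int → List (Int × Int)
  | s, [] => [(s, total)]
  | s, b :: vs => (s, b) :: pvChain total (b + 1) vs

-- the boundaries B keeps: those whose look-ahead gap is ≥ msf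
def pvKept (total msf : Int) : List Int → List Int
  | [] => []
  | b :: vs => (if msf ≤ (vs.headD total) - b then [b] else []) ++ pvKept total msf vs

-- merge loop of A, recursively with an explicit "current last" element
def pvMergeRec (msf : Int) : (Int × Int) → List (Int × Int) → List (Int × Int)
  | cur, [] => [cur]
  | cur, r :: rs => if r.2 - r.1 + 1 < msf then pvMergeRec msf (cur.1, r.2) rs
                    else cur :: pvMergeRec msf r rs

lemma pvBuildA_eq (total : Int) :
    ∀ (vs : List Int) (acc : List (Int × Int)) (s : Int),
      vs.Pairwise (· < ·) → (∀ b ∈ vs, s ≤ b) →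
      (let st := vs.foldl pvCutStepA (acc, s); st.1 ++ [(st.2, total)])
        = acc ++ pvChain total s vs := by
  intro vs
  induction vs with
  | nil => intro acc s _ _; simp [pvChain]
  | cons b vs ih =>
    intro acc s hp hge
    have hsb : s ≤ b := hge b (by simp)
    have hp' := (List.pairwise_cons.mp hp)
    simp only [List.foldl_cons, pvCutStepA, if_pos hsb]
    rw [ih (acc ++ [(s, b)]) (b + 1) hp'.2 (fun c hc => by have := hp'.1 c hc; omega)]
    simp [pvChain]

lemma pvBuildB_eq (total : Int) :
    ∀ (vs : List Int) (acc : List (Int × Int)) (s : Int),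
      (let st := vs.foldl pvCutStepB (acc, s); st.1 ++ [(st.2, total)])
        = acc ++ pvChain total s vs := by
  intro vs
  induction vs with
  | nil => intro acc s; simp [pvChain]
  | cons b vs ih =>
    intro acc s
    simp only [List.foldl_cons, pvCutStepB]
    rw [ih (acc ++ [(s, b)]) (b + 1)]
    simp [pvChain]

lemma pvMerge_foldl (msf : Int) :
    ∀ (rs : List (Int × Int)) (acc : List (Int × Int)) (cur : Int × Int),
      rs.foldl (pvMergeStepA msf) (acc ++ [cur]) = acc ++ pvMergeRec msf cur rs := by
  intro rs
  induction rs with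
  | nil => intro acc cur; simp [pvMergeRec]
  | cons r rs ih =>
    intro acc cur
    have hne : acc ++ [cur] ≠ [] := by simp
    simp only [List.foldl_cons, pvMergeStepA, if_neg hne, pvMergeRec]
    by_cases h : r.2 - r.1 + 1 < msf
    · rw [if_pos h, if_pos h]
      rw [List.dropLast_concat, List.getLast?_concat]
      simp only [Option.getD_some]
      exact ih acc (cur.1, r.2)
    · rw [if_neg h, if_neg h]
      have := ih (acc ++ [cur]) r
      rw [List.append_assoc] at this ⊢
      simpa using this

lemma pvMerge_main (total msf : Int) :
    ∀ (vs : List Int) (a s : Int),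
      pvMergeRec msf (s, a) (pvChain total (a + 1) vs)
        = pvChain total s (pvKept total msf (a :: vs)) := by
  intro vs
  induction vs with
  | nil =>
    intro a s
    simp only [pvChain, pvMergeRec, pvKept, List.headD]
    by_cases h : total - (a + 1) + 1 < msf
    · rw [if_pos h, if_neg (by omega : ¬ msf ≤ total - a)]
      simp [pvChain]
    · rw [if_neg h, if_pos (by omega : msf ≤ total - a)]
      simp [pvChain]
  | cons b vs ih =>
    intro a s
    simp only [pvChain, pvMergeRec]
    by_cases h : b - (a + 1) + 1 < msf
    · rw [if_pos h]
      rw [ih b s]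
      simp only [pvKept, List.headD_cons]
      rw [if_neg (by omega : ¬ msf ≤ b - a)]
      rfl
    · rw [if_neg h]
      rw [ih b (a + 1)]
      simp only [pvKept, List.headD_cons]
      rw [if_pos (by omega : msf ≤ b - a)]
      simp [pvChain]

lemma pvKeptZip_eq (total msf : Int) :
    ∀ (vs : List Int),
      ((vs.zip (vs.tail ++ [total])).filter
          (fun p => decide (msf ≤ p.2 - p.1))).map Prod.fst
        = pvKept total msf vs := by
  intro vs
  induction vs with
  | nil => simp [pvKept]
  | cons b vs ih =>
    cases vs with
    | nil =>
      simp only [List.tail_cons, List.nil_append, List.zip_cons_cons, List.zip_nil_right,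
        List.filter, pvKept, List.headD_nil]
      by_cases h : msf ≤ total - b
      · simp [h]
      · simp [h]
    | cons c vs' =>
      simp only [List.tail_cons] at ih ⊢
      simp only [List.cons_append, List.zip_cons_cons, List.filter]
      by_cases h : msf ≤ c - b
      · rw [decide_eq_true (show msf ≤ (b, c).2 - (b, c).1 from h)]
        simp only [List.map_cons, ih]
        rw [show pvKept total msf (b :: c :: vs') = b :: pvKept total msf (c :: vs') from by
          simp [pvKept, h]]
      · rw [decide_eq_false (show ¬ msf ≤ (b, c).2 - (b, c).1 from h)]
        rw [show pvKept total msf (b :: c :: vs') = pvKept total msf (c :: vs') from by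
          simp [pvKept, h]]
        exact ih

lemma pvValid_sorted_props (total : Int) (boundaries : List Int) :
    (PySem.List.sorted
      (PySem.Set.ofList (boundaries.filter (fun b => decide (1 ≤ b) && decide (b < total))))
      (fun x => x) false).Pairwise (· < ·)
    ∧ ∀ b ∈ (PySem.List.sorted
      (PySem.Set.ofList (boundaries.filter (fun b => decide (1 ≤ b) && decide (b < total))))
      (fun x => x) false), 1 ≤ b := by
  constructor
  · exact PySem.List.sorted_ofList_pairwise_lt _
  · intro b hb
    rw [PySem.List.mem_sorted] at hb
    rw [PySem.Set.mem_ofList] at hb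
    have := List.of_mem_filter hb
    simp only [Bool.and_eq_true, decide_eq_true_eq] at this
    exact this.1

-- ===== VERDICT (by name: the statement is the Claim_ definition above) =====
theorem build_scene_ranges_spec : Claim_equal_build_scene_ranges := by
  intro total_frames boundaries min_scene_frames _
  unfold Spec_build_scene_ranges build_scene_ranges build_scene_ranges_alt
  by_cases htot : total_frames ≤ 0
  · simp [htot]
  · rw [if_neg htot, if_neg htot]
    set valid := PySem.List.sorted
      (PySem.Set.ofList (boundaries.filter (fun b => decide (1 ≤ b) && decide (b < total_frames))))
      (fun x => x) false with hvalid
    obtain ⟨hpair, hge⟩ := pvValid_sorted_props total_frames boundaries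
    rw [← hvalid] at hpair hge
    have hA := pvBuildA_eq total_frames valid [] 1 hpair hge
    simp only [List.nil_append] at hA
    by_cases hm : min_scene_frames ≤ 1
    · simp only [if_pos hm]
      have hB := pvBuildB_eq total_frames valid [] 1
      simp only [List.nil_append] at hB
      rw [hA, hB]
    · simp only [if_neg hm]
      rw [hA]
      have hB := pvBuildB_eq total_frames
        (((valid.zip (PySem.List.slice valid (some 1) none ++ [total_frames])).filter
          (fun p => decide (min_scene_frames ≤ p.2 - p.1))).map Prod.fst) [] 1
      simp only [List.nil_append] at hB
      rw [hB, PySem.List.slice_from_one, pvKeptZip_eq]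
      cases valid with
      | nil => simp [pvChain, pvMergeStepA, pvKept]
      | cons a vs =>
        simp only [pvChain, List.foldl_cons]
        have hstep : pvMergeStepA min_scene_frames [] (1, a) = [] ++ [(1, a)] := by
          simp [pvMergeStepA]
        rw [hstep, pvMerge_foldl, pvMerge_main]
        simp
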